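-- pv_equiv track=rewrite | github.com/savvyed/BMC | generate_config.py | challenge_fields
-- ===== SOURCE A (Python) =====
-- def challenge_fields(prefix, checklist_count):
--     L = []
--     L.append('- label: "Page title"')
--     L.append('  name: ' + prefix + 'PageTitle')
--     L.append('  widget: string')
--     L.append('  hint: "Shown in the browser tab and header. Example: Challenge 02 — Join a video visit"')
--     L.append('')
--     L.append('# Watch step (Step 1)')
--     L.append('- label: "Watch — progress label"')
--     L.append('  name: ' + prefix + 'Step1Label')
--     L.append('  widget: string')
--     L.append('  hint: "Small label above the heading. Example: Step 1 of 3 — Watch"')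
--     L.append('')
--     L.append('- label: "Watch — main heading"')
--     L.append('  name: ' + prefix + 'Step1Heading')
--     L.append('  widget: string')
--     L.append('  hint: "Large heading above the video. Example: How to join a video visit on your phone"')
--     L.append('')
--     L.append('- label: "Watch — video caption"')
--     L.append('  name: ' + prefix + 'Step1VideoPH')
--     L.append('  widget: string')
--     L.append('  hint: "Text on the video placeholder until the real video is added. Briefly describes what the video covers."')
--     L.append('')
--     L.append('# Practice step (Step 2)')
--     L.append('- label: "Practice — progress label"')
--     L.append('  name: ' + prefix + 'Step2Label')
--     L.append('  widget: string')
--     L.append('  hint: "Example: Step 2 of 3 — Practice"')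
--     L.append('')
--     L.append('- label: "Practice — main heading"')
--     L.append('  name: ' + prefix + 'Step2Heading')
--     L.append('  widget: string')
--     L.append('  hint: "Names the character and the task. Example: Help Marcus join his visit"')
--     L.append('')
--     L.append('- label: "Practice — scenario, sentence 1"')
--     L.append('  name: ' + prefix + 'Step2Intro')
--     L.append('  widget: string')
--     L.append('  hint: "Introduces the character and their situation. Example: Marcus needs to join a video visit from his phone during his lunch break."')
--     L.append('')
--     L.append('- label: "Practice — scenario, sentence 2"')
--     L.append('  name: ' + prefix + 'Step2Intro2')
--     L.append('  widget: string')
--     L.append('  hint: "What the patient needs to help the character do. Example: Help him find his appointment and tap Begin Visit."')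
--     L.append('')
--     L.append('# Do it step (Step 3)')
--     L.append('- label: "Do it — progress label"')
--     L.append('  name: ' + prefix + 'Step3Label')
--     L.append('  widget: string')
--     L.append('  hint: "Example: Step 3 of 3 — Do it on your phone"')
--     L.append('')
--     L.append('- label: "Do it — main heading"')
--     L.append('  name: ' + prefix + 'Step3Heading')
--     L.append('  widget: string')
--     L.append('  hint: "Example: Now try it on your own MyChart"')
--     L.append('')
--     L.append('- label: "Do it — intro text"')
--     L.append('  name: ' + prefix + 'Step3Intro')
--     L.append('  widget: string')
--     L.append('  hint: "Shown above the checklist. Example: Open MyChart on your phone and follow these steps:"')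
--     L.append('')
--     L.append('# Checklist items')
--     for i in range(1, checklist_count + 1):
--         L.append('- label: "Checklist — item ' + str(i) + '"')
--         L.append('  name: ' + prefix + 'Check' + str(i))
--         L.append('  widget: text')
--         if i == 1:
--             L.append('  hint: "Steps the patient checks off. Start with a verb: Tap, Open, Enter, Find... Keep them short."')
--         L.append('')
--     return "\n".join(L)
-- ===== SOURCE B (Python) =====
-- # Template-based rewrite: the static section is a tuple of template fragments
-- # joined with the prefix as separator; the checklist tail is the
-- # concatenation of one pre-rendered block string per item (no list of lines).
--
-- # The static section, written as the fragments between the name-prefix slots;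
-- # ''.join-ing them with the prefix as separator yields the whole static text.
-- _PARTS = (
--     '- label: "Page title"\n  name: ',
--     'PageTitle\n  widget: string\n  hint: "Shown in the browser tab and header. Example: Challenge 02 — Join a video visit"\n\n# Watch step (Step 1)\n- label: "Watch — progress label"\n  name: ',
--     'Step1Label\n  widget: string\n  hint: "Small label above the heading. Example: Step 1 of 3 — Watch"\n\n- label: "Watch — main heading"\n  name: ',
--     'Step1Heading\n  widget: string\n  hint: "Large heading above the video. Example: How to join a video visit on your phone"\n\n- label: "Watch — video caption"\n  name: ',
--     'Step1VideoPH\n  widget: string\n  hint: "Text on the video placeholder until the real video is added. Briefly describes what the video covers."\n\n# Practice step (Step 2)\n- label: "Practice — progress label"\n  name: ',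
--     'Step2Label\n  widget: string\n  hint: "Example: Step 2 of 3 — Practice"\n\n- label: "Practice — main heading"\n  name: ',
--     'Step2Heading\n  widget: string\n  hint: "Names the character and the task. Example: Help Marcus join his visit"\n\n- label: "Practice — scenario, sentence 1"\n  name: ',
--     'Step2Intro\n  widget: string\n  hint: "Introduces the character and their situation. Example: Marcus needs to join a video visit from his phone during his lunch break."\n\n- label: "Practice — scenario, sentence 2"\n  name: ',
--     'Step2Intro2\n  widget: string\n  hint: "What the patient needs to help the character do. Example: Help him find his appointment and tap Begin Visit."\n\n# Do it step (Step 3)\n- label: "Do it — progress label"\n  name: ',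
--     'Step3Label\n  widget: string\n  hint: "Example: Step 3 of 3 — Do it on your phone"\n\n- label: "Do it — main heading"\n  name: ',
--     'Step3Heading\n  widget: string\n  hint: "Example: Now try it on your own MyChart"\n\n- label: "Do it — intro text"\n  name: ',
--     'Step3Intro\n  widget: string\n  hint: "Shown above the checklist. Example: Open MyChart on your phone and follow these steps:"\n\n# Checklist items',
-- )
--
--
-- def _item(prefix, i):
--     """One checklist item rendered as a single block string."""
--     block = ('\n- label: "Checklist \u2014 item ' + str(i) + '"'
--              '\n  name: ' + prefix + 'Check' + str(i) +
--              '\n  widget: text')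
--     if i == 1:
--         block += ('\n  hint: "Steps the patient checks off. Start with a verb:'
--                   ' Tap, Open, Enter, Find... Keep them short."')
--     return block + '\n'
--
--
-- def challenge_fields(prefix, checklist_count):
--     return prefix.join(_PARTS) + ''.join(
--         _item(prefix, i) for i in range(1, checklist_count + 1))
-- ===== Notes on version B (the rewrite author's own statement) =====
-- stated objective: simpler
-- what changed: A appends ~60 individual lines to a list and joins them with newlines; B never builds a list of lines: the static section is a tuple of template fragments joined with the prefix as separator, and the checklist tail is the concatenation of one pre-rendered block string per item.
import Mathlib
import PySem

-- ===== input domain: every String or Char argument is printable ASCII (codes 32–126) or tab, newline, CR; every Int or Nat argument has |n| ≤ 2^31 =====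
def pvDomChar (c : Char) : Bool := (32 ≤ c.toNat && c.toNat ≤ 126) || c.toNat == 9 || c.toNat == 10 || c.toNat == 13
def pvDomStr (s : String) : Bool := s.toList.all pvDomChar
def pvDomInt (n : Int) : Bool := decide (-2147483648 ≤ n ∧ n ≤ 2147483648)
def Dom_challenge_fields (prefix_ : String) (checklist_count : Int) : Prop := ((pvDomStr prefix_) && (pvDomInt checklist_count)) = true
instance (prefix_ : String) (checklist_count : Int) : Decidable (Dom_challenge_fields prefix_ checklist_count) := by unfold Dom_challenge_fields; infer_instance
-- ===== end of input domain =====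

-- B replaces A's per-line appends by a one-literal template instantiated with split/join plus per-item block strings (objective: simpler); same result proved equal.
set_option maxRecDepth 20000


-- ===== PORT A =====
def challenge_fields (prefix_ : String) (checklist_count : Int) : String :=
  let L : List String := []
  let L := L ++ ["- label: \"Page title\""]
  let L := L ++ ["  name: " ++ prefix_ ++ "PageTitle"]
  let L := L ++ ["  widget: string"]
  let L := L ++ ["  hint: \"Shown in the browser tab and header. Example: Challenge 02 — Join a video visit\""]
  let L := L ++ [""]
  let L := L ++ ["# Watch step (Step 1)"]
  let L := L ++ ["- label: \"Watch — progress label\""]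
  let L := L ++ ["  name: " ++ prefix_ ++ "Step1Label"]
  let L := L ++ ["  widget: string"]
  let L := L ++ ["  hint: \"Small label above the heading. Example: Step 1 of 3 — Watch\""]
  let L := L ++ [""]
  let L := L ++ ["- label: \"Watch — main heading\""]
  let L := L ++ ["  name: " ++ prefix_ ++ "Step1Heading"]
  let L := L ++ ["  widget: string"]
  let L := L ++ ["  hint: \"Large heading above the video. Example: How to join a video visit on your phone\""]
  let L := L ++ [""]
  let L := L ++ ["- label: \"Watch — video caption\""]
  let L := L ++ ["  name: " ++ prefix_ ++ "Step1VideoPH"]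
  let L := L ++ ["  widget: string"]
  let L := L ++ ["  hint: \"Text on the video placeholder until the real video is added. Briefly describes what the video covers.\""]
  let L := L ++ [""]
  let L := L ++ ["# Practice step (Step 2)"]
  let L := L ++ ["- label: \"Practice — progress label\""]
  let L := L ++ ["  name: " ++ prefix_ ++ "Step2Label"]
  let L := L ++ ["  widget: string"]
  let L := L ++ ["  hint: \"Example: Step 2 of 3 — Practice\""]
  let L := L ++ [""]
  let L := L ++ ["- label: \"Practice — main heading\""]
  let L := L ++ ["  name: " ++ prefix_ ++ "Step2Heading"]
  let L := L ++ ["  widget: string"]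
  let L := L ++ ["  hint: \"Names the character and the task. Example: Help Marcus join his visit\""]
  let L := L ++ [""]
  let L := L ++ ["- label: \"Practice — scenario, sentence 1\""]
  let L := L ++ ["  name: " ++ prefix_ ++ "Step2Intro"]
  let L := L ++ ["  widget: string"]
  let L := L ++ ["  hint: \"Introduces the character and their situation. Example: Marcus needs to join a video visit from his phone during his lunch break.\""]
  let L := L ++ [""]
  let L := L ++ ["- label: \"Practice — scenario, sentence 2\""]
  let L := L ++ ["  name: " ++ prefix_ ++ "Step2Intro2"]
  let L := L ++ ["  widget: string"]
  let L := L ++ ["  hint: \"What the patient needs to help the character do. Example: Help him find his appointment and tap Begin Visit.\""]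
  let L := L ++ [""]
  let L := L ++ ["# Do it step (Step 3)"]
  let L := L ++ ["- label: \"Do it — progress label\""]
  let L := L ++ ["  name: " ++ prefix_ ++ "Step3Label"]
  let L := L ++ ["  widget: string"]
  let L := L ++ ["  hint: \"Example: Step 3 of 3 — Do it on your phone\""]
  let L := L ++ [""]
  let L := L ++ ["- label: \"Do it — main heading\""]
  let L := L ++ ["  name: " ++ prefix_ ++ "Step3Heading"]
  let L := L ++ ["  widget: string"]
  let L := L ++ ["  hint: \"Example: Now try it on your own MyChart\""]
  let L := L ++ [""]
  let L := L ++ ["- label: \"Do it — intro text\""]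
  let L := L ++ ["  name: " ++ prefix_ ++ "Step3Intro"]
  let L := L ++ ["  widget: string"]
  let L := L ++ ["  hint: \"Shown above the checklist. Example: Open MyChart on your phone and follow these steps:\""]
  let L := L ++ [""]
  let L := L ++ ["# Checklist items"]
  let L := (PySem.List.pyRange 1 (checklist_count + 1) 1).foldl (fun acc i =>
    let acc := acc ++ ["- label: \"Checklist — item " ++ PySem.Int.toStr i ++ "\""]
    let acc := acc ++ ["  name: " ++ prefix_ ++ "Check" ++ PySem.Int.toStr i]
    let acc := acc ++ ["  widget: text"]
    let acc := if i == 1 then acc ++ ["  hint: \"Steps the patient checks off. Start with a verb: Tap, Open, Enter, Find... Keep them short.\""] else acc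
    acc ++ [""]) L
  PySem.Str.join "\n" L

-- ===== PORT B =====
-- Source B's _PARTS: the static section as the template fragments between the name-prefix slots
def pvParts : List String :=
  [ "- label: \"Page title\"\n  name: ",
    "PageTitle\n  widget: string\n  hint: \"Shown in the browser tab and header. Example: Challenge 02 — Join a video visit\"\n\n# Watch step (Step 1)\n- label: \"Watch — progress label\"\n  name: ",
    "Step1Label\n  widget: string\n  hint: \"Small label above the heading. Example: Step 1 of 3 — Watch\"\n\n- label: \"Watch — main heading\"\n  name: ",
    "Step1Heading\n  widget: string\n  hint: \"Large heading above the video. Example: How to join a video visit on your phone\"\n\n- label: \"Watch — video caption\"\n  name: ",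
    "Step1VideoPH\n  widget: string\n  hint: \"Text on the video placeholder until the real video is added. Briefly describes what the video covers.\"\n\n# Practice step (Step 2)\n- label: \"Practice — progress label\"\n  name: ",
    "Step2Label\n  widget: string\n  hint: \"Example: Step 2 of 3 — Practice\"\n\n- label: \"Practice — main heading\"\n  name: ",
    "Step2Heading\n  widget: string\n  hint: \"Names the character and the task. Example: Help Marcus join his visit\"\n\n- label: \"Practice — scenario, sentence 1\"\n  name: ",
    "Step2Intro\n  widget: string\n  hint: \"Introduces the character and their situation. Example: Marcus needs to join a video visit from his phone during his lunch break.\"\n\n- label: \"Practice — scenario, sentence 2\"\n  name: ",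
    "Step2Intro2\n  widget: string\n  hint: \"What the patient needs to help the character do. Example: Help him find his appointment and tap Begin Visit.\"\n\n# Do it step (Step 3)\n- label: \"Do it — progress label\"\n  name: ",
    "Step3Label\n  widget: string\n  hint: \"Example: Step 3 of 3 — Do it on your phone\"\n\n- label: \"Do it — main heading\"\n  name: ",
    "Step3Heading\n  widget: string\n  hint: \"Example: Now try it on your own MyChart\"\n\n- label: \"Do it — intro text\"\n  name: ",
    "Step3Intro\n  widget: string\n  hint: \"Shown above the checklist. Example: Open MyChart on your phone and follow these steps:\"\n\n# Checklist items" ]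

-- Source B's _item: one checklist item rendered as a single block string
def pvItem (prefix_ : String) (i : Int) : String :=
  let block := "\n- label: \"Checklist — item " ++ PySem.Int.toStr i ++ "\"" ++
               "\n  name: " ++ prefix_ ++ "Check" ++ PySem.Int.toStr i ++
               "\n  widget: text"
  let block := if i == 1 then
      block ++ "\n  hint: \"Steps the patient checks off. Start with a verb: Tap, Open, Enter, Find... Keep them short.\""
    else block
  block ++ "\n"

def challenge_fields_alt (prefix_ : String) (checklist_count : Int) : String :=
  PySem.Str.join prefix_ pvParts ++
  PySem.Str.join "" ((PySem.List.pyRange 1 (checklist_count + 1) 1).map (pvItem prefix_))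

-- ===== PRECONDITION & SPEC =====
def Spec_challenge_fields (prefix_ : String) (checklist_count : Int) (out : String) : Prop := out = challenge_fields_alt prefix_ checklist_count
instance (prefix_ : String) (checklist_count : Int) (out : String) : Decidable (Spec_challenge_fields prefix_ checklist_count out) := by unfold Spec_challenge_fields; infer_instance

-- ===== CLAIM =====
def Claim_equal_challenge_fields : Prop := ∀ (prefix_ : String) (checklist_count : Int), Dom_challenge_fields prefix_ checklist_count → Spec_challenge_fields prefix_ checklist_count (challenge_fields prefix_ checklist_count)

-- ===== LEMMAS AND PROOFS =====

theorem pv_ic_cons (s x y : List Char) (l : List (List Char)) :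
    List.intercalate s (x :: y :: l) = x ++ s ++ List.intercalate s (y :: l) := by
  simp [List.intercalate, List.intersperse]

theorem pv_ic_append (s : List Char) (b : List (List Char)) (hb : b ≠ []) :
    ∀ a : List (List Char), a ≠ [] →
    List.intercalate s (a ++ b) = List.intercalate s a ++ s ++ List.intercalate s b := by
  intro a
  induction a with
  | nil => intro h; exact absurd rfl h
  | cons x t ih =>
    intro _
    cases t with
    | nil =>
      cases b with
      | nil => exact absurd rfl hb
      | cons y l => simp [List.intercalate]
    | cons y l =>
      have h2 := ih (by simp)
      have h3 : (x :: y :: l) ++ b = x :: y :: (l ++ b) := by simp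
      rw [h3, pv_ic_cons, show y :: (l ++ b) = (y :: l) ++ b from rfl, h2, pv_ic_cons]
      simp [List.append_assoc]

theorem pv_join_append (sep : String) (a b : List String) (ha : a ≠ []) (hb : b ≠ []) :
    PySem.Str.join sep (a ++ b) = PySem.Str.join sep a ++ sep ++ PySem.Str.join sep b := by
  apply String.toList_inj.mp
  simp only [PySem.Str.toList_join, PySem.Chars.join, List.map_append, String.toList_append]
  exact pv_ic_append _ _ (by simpa using hb) _ (by simpa using ha)

theorem pv_join_empty_cons (x : String) (l : List String) :
    PySem.Str.join "" (x :: l) = x ++ PySem.Str.join "" l := by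
  cases l with
  | nil =>
    apply String.toList_inj.mp
    simp [PySem.Str.join, PySem.Chars.join, List.intercalate]
  | cons y t =>
    apply String.toList_inj.mp
    simp only [PySem.Str.toList_join, PySem.Chars.join, List.map_cons, String.toList_append]
    rw [pv_ic_cons]
    simp

-- A's loop body over an accumulator equals appending B's block string after the join
theorem pv_block_eq (prefix_ : String) (i : Int) (acc : List String) (h : acc ≠ []) :
    PySem.Str.join "\n"
      ((if i == 1 then
          ((acc ++ ["- label: \"Checklist — item " ++ PySem.Int.toStr i ++ "\""]
             ++ ["  name: " ++ prefix_ ++ "Check" ++ PySem.Int.toStr i]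
             ++ ["  widget: text"]))
            ++ ["  hint: \"Steps the patient checks off. Start with a verb: Tap, Open, Enter, Find... Keep them short.\""]
        else
          (acc ++ ["- label: \"Checklist — item " ++ PySem.Int.toStr i ++ "\""]
             ++ ["  name: " ++ prefix_ ++ "Check" ++ PySem.Int.toStr i]
             ++ ["  widget: text"])) ++ [""]) =
    PySem.Str.join "\n" acc ++ pvItem prefix_ i := by
  by_cases hi : i == 1 <;>
  · simp only [hi, if_true, if_false, Bool.false_eq_true, List.append_assoc, List.cons_append, List.nil_append]
    rw [pv_join_append "\n" acc _ h (by simp)]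
    apply String.toList_inj.mp
    simp [pvItem, hi, PySem.Str.join, PySem.Chars.join, List.intercalate, List.intersperse]

-- the loop, for any index list and nonempty accumulator
theorem pv_loop (prefix_ : String) (r : List Int) :
    ∀ acc : List String, acc ≠ [] →
    PySem.Str.join "\n" (r.foldl (fun acc i =>
      let acc := acc ++ ["- label: \"Checklist — item " ++ PySem.Int.toStr i ++ "\""]
      let acc := acc ++ ["  name: " ++ prefix_ ++ "Check" ++ PySem.Int.toStr i]
      let acc := acc ++ ["  widget: text"]
      let acc := if i == 1 then acc ++ ["  hint: \"Steps the patient checks off. Start with a verb: Tap, Open, Enter, Find... Keep them short.\""] else acc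
      acc ++ [""]) acc) =
    PySem.Str.join "\n" acc ++ PySem.Str.join "" (r.map (pvItem prefix_)) := by
  induction r with
  | nil =>
    intro acc _
    apply String.toList_inj.mp
    simp [PySem.Str.join, PySem.Chars.join, List.intercalate]
  | cons i r ih =>
    intro acc h
    simp only [List.foldl_cons, List.map_cons]
    rw [ih _ (by by_cases hi : i == 1 <;> simp [hi])]
    rw [show (let acc' := acc ++ ["- label: \"Checklist — item " ++ PySem.Int.toStr i ++ "\""]
              let acc' := acc' ++ ["  name: " ++ prefix_ ++ "Check" ++ PySem.Int.toStr i]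
              let acc' := acc' ++ ["  widget: text"]
              let acc' := if i == 1 then acc' ++ ["  hint: \"Steps the patient checks off. Start with a verb: Tap, Open, Enter, Find... Keep them short.\""] else acc'
              acc' ++ [""]) =
          (if i == 1 then
          ((acc ++ ["- label: \"Checklist — item " ++ PySem.Int.toStr i ++ "\""]
             ++ ["  name: " ++ prefix_ ++ "Check" ++ PySem.Int.toStr i]
             ++ ["  widget: text"]))
            ++ ["  hint: \"Steps the patient checks off. Start with a verb: Tap, Open, Enter, Find... Keep them short.\""]
        else
          (acc ++ ["- label: \"Checklist — item " ++ PySem.Int.toStr i ++ "\""]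
             ++ ["  name: " ++ prefix_ ++ "Check" ++ PySem.Int.toStr i]
             ++ ["  widget: text"])) ++ [""] from by by_cases hi : i == 1 <;> simp [hi]]
    rw [pv_block_eq prefix_ i acc h]
    rw [pv_join_empty_cons, String.append_assoc]


-- the hand-written static prefix, joined with newlines, equals the prefix-joined fragments
theorem pv_static (prefix_ : String) :
    PySem.Str.join "\n" (([] : List String)
      ++ ["- label: \"Page title\""]
      ++ ["  name: " ++ prefix_ ++ "PageTitle"]
      ++ ["  widget: string"]
      ++ ["  hint: \"Shown in the browser tab and header. Example: Challenge 02 — Join a video visit\""]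
      ++ [""]
      ++ ["# Watch step (Step 1)"]
      ++ ["- label: \"Watch — progress label\""]
      ++ ["  name: " ++ prefix_ ++ "Step1Label"]
      ++ ["  widget: string"]
      ++ ["  hint: \"Small label above the heading. Example: Step 1 of 3 — Watch\""]
      ++ [""]
      ++ ["- label: \"Watch — main heading\""]
      ++ ["  name: " ++ prefix_ ++ "Step1Heading"]
      ++ ["  widget: string"]
      ++ ["  hint: \"Large heading above the video. Example: How to join a video visit on your phone\""]
      ++ [""]
      ++ ["- label: \"Watch — video caption\""]
      ++ ["  name: " ++ prefix_ ++ "Step1VideoPH"]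
      ++ ["  widget: string"]
      ++ ["  hint: \"Text on the video placeholder until the real video is added. Briefly describes what the video covers.\""]
      ++ [""]
      ++ ["# Practice step (Step 2)"]
      ++ ["- label: \"Practice — progress label\""]
      ++ ["  name: " ++ prefix_ ++ "Step2Label"]
      ++ ["  widget: string"]
      ++ ["  hint: \"Example: Step 2 of 3 — Practice\""]
      ++ [""]
      ++ ["- label: \"Practice — main heading\""]
      ++ ["  name: " ++ prefix_ ++ "Step2Heading"]
      ++ ["  widget: string"]
      ++ ["  hint: \"Names the character and the task. Example: Help Marcus join his visit\""]
      ++ [""]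
      ++ ["- label: \"Practice — scenario, sentence 1\""]
      ++ ["  name: " ++ prefix_ ++ "Step2Intro"]
      ++ ["  widget: string"]
      ++ ["  hint: \"Introduces the character and their situation. Example: Marcus needs to join a video visit from his phone during his lunch break.\""]
      ++ [""]
      ++ ["- label: \"Practice — scenario, sentence 2\""]
      ++ ["  name: " ++ prefix_ ++ "Step2Intro2"]
      ++ ["  widget: string"]
      ++ ["  hint: \"What the patient needs to help the character do. Example: Help him find his appointment and tap Begin Visit.\""]
      ++ [""]
      ++ ["# Do it step (Step 3)"]
      ++ ["- label: \"Do it — progress label\""]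
      ++ ["  name: " ++ prefix_ ++ "Step3Label"]
      ++ ["  widget: string"]
      ++ ["  hint: \"Example: Step 3 of 3 — Do it on your phone\""]
      ++ [""]
      ++ ["- label: \"Do it — main heading\""]
      ++ ["  name: " ++ prefix_ ++ "Step3Heading"]
      ++ ["  widget: string"]
      ++ ["  hint: \"Example: Now try it on your own MyChart\""]
      ++ [""]
      ++ ["- label: \"Do it — intro text\""]
      ++ ["  name: " ++ prefix_ ++ "Step3Intro"]
      ++ ["  widget: string"]
      ++ ["  hint: \"Shown above the checklist. Example: Open MyChart on your phone and follow these steps:\""]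
      ++ [""]
      ++ ["# Checklist items"]) = PySem.Str.join prefix_ pvParts := by
  apply String.toList_inj.mp
  simp [pvParts, PySem.Str.join, PySem.Chars.join, List.intercalate, List.intersperse]

-- ===== VERDICT =====
theorem challenge_fields_spec : Claim_equal_challenge_fields := by
  intro prefix_ checklist_count _
  unfold Spec_challenge_fields challenge_fields challenge_fields_alt
  dsimp only
  rw [pv_loop prefix_ _ _ (by simp), pv_static]
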